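-- pv_equiv track=rewrite | github.com/fireblaze17/Spellforge | src/word_tokenizer.py | _apply_bpe_to_word
-- ===== SOURCE A (Python) =====
-- END_OF_WORD = "</w>"
--
-- CONTINUATION_PREFIX = "##"
--
-- def _word_to_symbols(word):
--     """
--     Convert a word into initial character symbols with an end-of-word marker.
--     """
--     if word == "":
--         return []
--
--     symbols = list(word)
--     symbols[-1] = symbols[-1] + END_OF_WORD
--     return symbols
--
-- def _merge_pair_in_symbols(symbols, pair):
--     """
--     Merge one symbol pair left-to-right inside a symbol sequence.
--     """
--     merged = []
--     i = 0
--     while i < len(symbols):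
--         if i < len(symbols) - 1 and (symbols[i], symbols[i + 1]) == pair:
--             merged.append(symbols[i] + symbols[i + 1])
--             i += 2
--         else:
--             merged.append(symbols[i])
--             i += 1
--     return merged
--
-- def _apply_bpe_to_word(word, merge_ranks):
--     """
--     Apply learned BPE merges to one token and return display-friendly subword pieces.
--     """
--     symbols = _word_to_symbols(word)
--     if not symbols:
--         return []
--
--     while len(symbols) > 1:
--         candidate_pairs = [
--             (merge_ranks[(symbols[i], symbols[i + 1])], (symbols[i], symbols[i + 1]))
--             for i in range(len(symbols) - 1)
--             if (symbols[i], symbols[i + 1]) in merge_ranks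
--         ]
--         if not candidate_pairs:
--             break
--
--         _, best_pair = min(candidate_pairs, key=lambda item: item[0])
--         symbols = _merge_pair_in_symbols(symbols, best_pair)
--
--     pieces = []
--     for i, symbol in enumerate(symbols):
--         piece = symbol
--         if piece.endswith(END_OF_WORD):
--             piece = piece[: -len(END_OF_WORD)]
--
--         if i > 0:
--             piece = CONTINUATION_PREFIX + piece
--         pieces.append(piece)
--
--     return pieces
-- ===== SOURCE B (Python) =====
-- END_OF_WORD = "</w>"
-- CONTINUATION_PREFIX = "##"
--
--
-- def _insort(agenda, item):
--     """Insert (rank, pair) into the rank-sorted agenda (ties go after equals)."""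
--     k = 0
--     while k < len(agenda) and agenda[k][0] <= item[0]:
--         k += 1
--     agenda.insert(k, item)
--
--
-- def _find_rank_pair(symbols, merge_ranks, r0):
--     """Leftmost adjacent pair whose rank is exactly r0 (None if r0 is stale)."""
--     for i in range(len(symbols) - 1):
--         q = (symbols[i], symbols[i + 1])
--         if merge_ranks.get(q) == r0:
--             return q
--     return None
--
--
-- def _merge_collect(symbols, pair, merge_ranks):
--     """Merge every occurrence of pair left-to-right; collect the ranked pairs
--     newly created around each merged symbol (for the agenda)."""
--     a, b = pair
--     ab = a + b
--     out, new, i = [], [], 0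
--     while i < len(symbols):
--         if i < len(symbols) - 1 and symbols[i] == a and symbols[i + 1] == b:
--             if out:
--                 q = (out[-1], ab)
--                 r = merge_ranks.get(q)
--                 if r is not None:
--                     new.append((r, q))
--             if i + 2 < len(symbols):
--                 q = (ab, symbols[i + 2])
--                 r = merge_ranks.get(q)
--                 if r is not None:
--                     new.append((r, q))
--             out.append(ab)
--             i += 2
--         else:
--             out.append(symbols[i])
--             i += 1
--     return out, new
--
--
-- def _apply_bpe_to_word(word, merge_ranks):
--     if word == "":
--         return []
--     symbols = list(word[:-1]) + [word[-1] + END_OF_WORD]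
--
--     # agenda: rank-sorted list of (rank, pair) candidates, maintained
--     # incrementally across merges; entries may go stale (lazy invalidation).
--     agenda = []
--     for i in range(len(symbols) - 1):
--         q = (symbols[i], symbols[i + 1])
--         r = merge_ranks.get(q)
--         if r is not None:
--             _insort(agenda, (r, q))
--
--     while agenda:
--         r0, p0 = agenda[0]
--         q0 = _find_rank_pair(symbols, merge_ranks, r0)
--         if q0 is None:
--             agenda.pop(0)          # stale rank: no pair of this rank occurs any more
--             continue
--         if q0 == p0:
--             agenda.pop(0)          # the entry's own pair is being merged away
--         symbols, new = _merge_collect(symbols, q0, merge_ranks)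
--         for item in new:
--             _insort(agenda, item)
--
--     def strip(s):
--         return s[:-len(END_OF_WORD)] if s.endswith(END_OF_WORD) else s
--
--     return [strip(symbols[0])] + [CONTINUATION_PREFIX + strip(s) for s in symbols[1:]]
-- ===== Notes on version B (the rewrite author's own statement) =====
-- stated objective: alternative
-- what changed: B replaces A's per-round rebuild of the full candidate list followed by min() with a rank-sorted candidate agenda maintained incrementally across merges with lazy invalidation: each merge pass collects only the pairs it newly creates and inserts them into the agenda, and each round pops the cheapest agenda rank and locates that rank's leftmost occurrence instead of re-scoring every adjacent position.
import Mathlib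
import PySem

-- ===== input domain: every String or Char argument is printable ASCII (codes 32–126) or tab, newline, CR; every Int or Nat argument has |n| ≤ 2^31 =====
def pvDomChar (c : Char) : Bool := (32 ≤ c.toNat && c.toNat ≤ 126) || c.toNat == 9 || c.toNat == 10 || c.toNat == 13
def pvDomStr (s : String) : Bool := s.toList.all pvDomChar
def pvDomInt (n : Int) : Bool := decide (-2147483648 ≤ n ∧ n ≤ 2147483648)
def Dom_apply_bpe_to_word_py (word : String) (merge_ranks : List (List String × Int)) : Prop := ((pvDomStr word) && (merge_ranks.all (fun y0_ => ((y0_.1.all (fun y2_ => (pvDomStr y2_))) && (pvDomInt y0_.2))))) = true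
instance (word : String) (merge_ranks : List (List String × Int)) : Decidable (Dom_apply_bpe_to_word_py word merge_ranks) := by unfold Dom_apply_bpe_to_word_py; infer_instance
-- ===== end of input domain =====

-- B replaces A's per-round full candidate rescan + min() with a rank-sorted agenda of
-- candidate pairs maintained incrementally across merges (lazy invalidation): the merge
-- pass collects only the pairs it newly creates, and each round pops the cheapest rank
-- and finds that rank's leftmost occurrence (an alternative algorithm, similar cost).

-- ===== PORT A =====
-- _word_to_symbols: list(word), then symbols[-1] = symbols[-1] + END_OF_WORD
def pvA_wordToSymbols (word : String) : List String :=
  if word = "" then []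
  else
    (word.toList.map (fun c => String.ofList [c])).dropLast
      ++ [PySem.List.pyGetD (word.toList.map (fun c => String.ofList [c])) (-1) "" ++ "</w>"]

-- _merge_pair_in_symbols: the while loop over index i with accumulator `merged`
-- (fuel = len(symbols): i advances every iteration, so the fuel never runs out).
-- Every index access is in range (loop guard), so getD's default is never used.
def pvA_mergeGo (symbols : List String) (pair : String × String) : Nat → List String → Nat → List String
  | 0, merged, _ => merged
  | fuel+1, merged, i =>
    if i < symbols.length then
      if i < symbols.length - 1 ∧ (symbols.getD i "", symbols.getD (i+1) "") = pair then
        pvA_mergeGo symbols pair fuel (merged ++ [symbols.getD i "" ++ symbols.getD (i+1) ""]) (i+2)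
      else
        pvA_mergeGo symbols pair fuel (merged ++ [symbols.getD i ""]) (i+1)
    else merged

-- the candidate_pairs comprehension: range(len(symbols)-1), membership test + dict
-- indexing rendered as one first-match lookup (exact: Python dicts have unique keys)
def pvA_candidates (symbols : List String) (merge_ranks : List (List String × Int)) : List (Int × String × String) :=
  (List.range (symbols.length - 1)).filterMap (fun i =>
    match PySem.Dict.get? (PySem.Dict.mk merge_ranks) [symbols.getD i "", symbols.getD (i+1) ""] with
    | some rank => some (rank, symbols.getD i "", symbols.getD (i+1) "")
    | none => none)

-- the `while len(symbols) > 1` loop; fuel = initial number of symbols (each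
-- iteration merges at least one adjacent pair, so the fuel never runs out)
def pvA_loop (merge_ranks : List (List String × Int)) : Nat → List String → List String
  | 0, symbols => symbols
  | fuel+1, symbols =>
    if 1 < symbols.length then
      match PySem.List.min? (pvA_candidates symbols merge_ranks) (fun item => item.1) with
      | none => symbols          -- `if not candidate_pairs: break`
      | some best => pvA_loop merge_ranks fuel (pvA_mergeGo symbols best.2 symbols.length [] 0)
    else symbols

def apply_bpe_to_word_py (word : String) (merge_ranks : List (List String × Int)) : List String :=
  let symbols := pvA_wordToSymbols word
  if symbols = [] then []
  else
    (PySem.List.enumerate (pvA_loop merge_ranks symbols.length symbols)).foldl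
      (fun pieces iv =>
        let piece := if PySem.Str.endswith iv.2 "</w>" then PySem.Str.slice iv.2 none (some (-4)) else iv.2
        let piece := if iv.1 > 0 then "##" ++ piece else piece
        pieces ++ [piece]) []

-- ===== PORT B =====
-- merge_ranks.get((a, b))
def pvRkB (mr : List (List String × Int)) (q : String × String) : Option Int :=
  PySem.Dict.get? (PySem.Dict.mk mr) [q.1, q.2]

-- _insort's index-finding while loop (fuel = len(agenda): the loop advances k
-- at most len(agenda) times, so the fuel never runs out)
def pvB_insortGo (ag : List (Int × (String × String))) (item : Int × (String × String)) : Nat → Nat → Nat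
  | 0, k => k
  | fuel+1, k =>
    if k < ag.length ∧ (ag.getD k (0, ("", ""))).1 ≤ item.1 then pvB_insortGo ag item fuel (k+1)
    else k

-- _insort: agenda.insert(k, item)
def pvB_insort (ag : List (Int × (String × String))) (item : Int × (String × String)) : List (Int × (String × String)) :=
  PySem.List.insert ag (pvB_insortGo ag item ag.length 0 : Nat) item

-- _find_rank_pair: the for-loop over i in range(len(symbols) - 1) (fuel = len(symbols))
def pvB_findGo (s : List String) (mr : List (List String × Int)) (r0 : Int) : Nat → Nat → Option (String × String)
  | 0, _ => none
  | fuel+1, i =>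
    if i < s.length - 1 then
      if pvRkB mr (s.getD i "", s.getD (i+1) "") = some r0 then some (s.getD i "", s.getD (i+1) "")
      else pvB_findGo s mr r0 fuel (i+1)
    else none

-- _merge_collect: the while loop with accumulators out, new and index i (fuel = len(symbols))
def pvB_mcGo (l : List String) (q : String × String) (mr : List (List String × Int)) :
    Nat → List String → List (Int × (String × String)) → Nat →
    List String × List (Int × (String × String))
  | 0, out, nw, _ => (out, nw)
  | fuel+1, out, nw, i =>
  if i < l.length then
    if i < l.length - 1 ∧ l.getD i "" = q.1 ∧ l.getD (i+1) "" = q.2 then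
      let ab := q.1 ++ q.2
      let nw1 := match out.getLast? with
        | none => nw
        | some x => match pvRkB mr (x, ab) with | none => nw | some r => nw ++ [(r, (x, ab))]
      let nw2 := if i + 2 < l.length then
          match pvRkB mr (ab, l.getD (i+2) "") with
          | none => nw1
          | some r => nw1 ++ [(r, (ab, l.getD (i+2) ""))]
        else nw1
      pvB_mcGo l q mr fuel (out ++ [ab]) nw2 (i+2)
    else pvB_mcGo l q mr fuel (out ++ [l.getD i ""]) nw (i+1)
  else (out, nw)

-- building the initial agenda: for i in range(len(symbols)-1): ... _insort(...)
def pvB_init (s : List String) (mr : List (List String × Int)) : List (Int × (String × String)) :=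
  (List.range (s.length - 1)).foldl (fun ag i =>
    match pvRkB mr (s.getD i "", s.getD (i+1) "") with
    | none => ag
    | some r => pvB_insort ag (r, (s.getD i "", s.getD (i+1) ""))) []

-- the `while agenda:` loop; fuel = len(agenda) + 3*len(symbols) (strictly decreasing
-- measure of each iteration, so the fuel never runs out)
def pvB_loop (mr : List (List String × Int)) : Nat → List String → List (Int × (String × String)) → List String
  | 0, s, _ => s
  | _+1, s, [] => s
  | fuel+1, s, (r0, p0) :: rest =>
    match pvB_findGo s mr r0 s.length 0 with
    | none => pvB_loop mr fuel s rest
    | some q0 =>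
      let ag1 := if q0 = p0 then rest else (r0, p0) :: rest
      let mc := pvB_mcGo s q0 mr s.length [] [] 0
      pvB_loop mr fuel mc.1 (mc.2.foldl (fun ag item => pvB_insort ag item) ag1)

def pvB_strip (s : String) : String :=
  if PySem.Str.endswith s "</w>" then PySem.Str.slice s none (some (-4)) else s

def apply_bpe_to_word_py_alt (word : String) (merge_ranks : List (List String × Int)) : List String :=
  if word = "" then []
  else
    match PySem.Str.pyGet? word (-1) with
    | none => []               -- unreachable: word ≠ ""
    | some last =>
      let symbols := (PySem.Str.slice word none (some (-1))).toList.map (fun c => String.ofList [c])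
                       ++ [String.ofList [last] ++ "</w>"]
      let agenda := pvB_init symbols merge_ranks
      match pvB_loop merge_ranks (agenda.length + 3 * symbols.length) symbols agenda with
      | [] => []               -- unreachable: symbols ≠ []
      | f :: rest => pvB_strip f :: rest.map (fun s => "##" ++ pvB_strip s)

-- ===== PRECONDITION & SPEC =====
def Spec_apply_bpe_to_word_py (word : String) (merge_ranks : List (List String × Int)) (out : List String) : Prop := out = apply_bpe_to_word_py_alt word merge_ranks
instance (word : String) (merge_ranks : List (List String × Int)) (out : List String) : Decidable (Spec_apply_bpe_to_word_py word merge_ranks out) := by unfold Spec_apply_bpe_to_word_py; infer_instance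

-- ===== CLAIM (what is proved, stated in full; the proofs are below) =====
def Claim_equal_apply_bpe_to_word_py : Prop := ∀ (word : String) (merge_ranks : List (List String × Int)), Dom_apply_bpe_to_word_py word merge_ranks → Spec_apply_bpe_to_word_py word merge_ranks (apply_bpe_to_word_py word merge_ranks)

-- ===== LEMMAS AND PROOFS =====

-- adjacent pairs of a symbol list (proof-only)
def pvAdj (l : List String) : List (String × String) := l.zip (l.drop 1)

-- the common functional description of one merge pass (proof-only helper)
def pvMergeSpec (a b : String) : List String → List String
  | [] => []
  | [x] => [x]
  | x :: y :: rest =>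
    if x = a ∧ y = b then (a ++ b) :: pvMergeSpec a b rest
    else x :: pvMergeSpec a b (y :: rest)

-- the entries pushed around a newly created symbol ab (proof-only)
def pvN1 (mr : List (List String × Int)) (ab : String) : Option String → List (Int × (String × String))
  | none => []
  | some z => match pvRkB mr (z, ab) with | none => [] | some r => [(r, (z, ab))]

def pvN2 (mr : List (List String × Int)) (ab : String) : Option String → List (Int × (String × String))
  | none => []
  | some z => match pvRkB mr (ab, z) with | none => [] | some r => [(r, (ab, z))]

-- functional description of _merge_collect (merged list + collected new entries)
def pvMC (mr : List (List String × Int)) (a b : String) :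
    Option String → List String → List String × List (Int × (String × String))
  | _, [] => ([], [])
  | _, [x] => ([x], [])
  | last, x :: y :: rest =>
    if x = a ∧ y = b then
      let p := pvMC mr a b (some (a ++ b)) rest
      ((a ++ b) :: p.1, pvN1 mr (a ++ b) last ++ pvN2 mr (a ++ b) rest.head? ++ p.2)
    else
      let p := pvMC mr a b (some x) (y :: rest)
      (x :: p.1, p.2)

-- functional description of _insort (insert after all entries of ≤ rank)
def pvSIns (item : Int × (String × String)) : List (Int × (String × String)) → List (Int × (String × String))
  | [] => [item]
  | x :: xs => if x.1 ≤ item.1 then x :: pvSIns item xs else item :: x :: xs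

def pvCandF (merge_ranks : List (List String × Int)) (p : String × String) : Option (Int × String × String) :=
  match PySem.Dict.get? (PySem.Dict.mk merge_ranks) [p.1, p.2] with
  | some rank => some (rank, p.1, p.2)
  | none => none

-- option-cons (proof-only)
def pvOptCons (last : Option String) (l : List String) : List String :=
  match last with | none => l | some x => x :: l

-- the loop invariant of B's agenda
def pvInv (mr : List (List String × Int)) (s : List String) (ag : List (Int × (String × String))) : Prop :=
  ag.Pairwise (fun e f => e.1 ≤ f.1) ∧
  (∀ q r, q ∈ pvAdj s → pvRkB mr q = some r → (r, q) ∈ ag) ∧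
  (∀ e ∈ ag, pvRkB mr e.2 = some e.1) ∧
  (∀ x ∈ s, x ≠ "")

theorem pv_append_ne_empty (x y : String) (hx : x ≠ "") : x ++ y ≠ "" := by
  intro h
  have h2 := congrArg String.toList h
  simp only [String.toList_append] at h2
  simp at h2
  exact hx h2.1

theorem pv_append_right_ne (a b : String) (hb : b ≠ "") : a ++ b ≠ a := by
  intro h
  have h2 := congrArg String.toList h
  simp only [String.toList_append] at h2
  simp at h2
  exact hb h2

theorem pv_append_left_ne (a b : String) (ha : a ≠ "") : a ++ b ≠ b := by
  intro h
  have h2 := congrArg String.toList h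
  simp only [String.toList_append] at h2
  simp at h2
  exact ha h2

theorem pvAdj_nil : pvAdj [] = [] := rfl
theorem pvAdj_single (x : String) : pvAdj [x] = [] := rfl
theorem pvAdj_cons2 (x y : String) (t : List String) :
    pvAdj (x :: y :: t) = (x, y) :: pvAdj (y :: t) := rfl

theorem pv_mem_adj_length {q : String × String} {l : List String} (h : q ∈ pvAdj l) : 1 < l.length := by
  match l with
  | [] => simp [pvAdj_nil] at h
  | [x] => simp [pvAdj_single] at h
  | x :: y :: t => simp

theorem pv_adj_fst_mem {q : String × String} {l : List String} (h : q ∈ pvAdj l) : q.1 ∈ l := by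
  have := List.of_mem_zip (show (q.1, q.2) ∈ l.zip (l.drop 1) from by simpa [pvAdj] using h)
  exact this.1

theorem pv_adj_snd_mem {q : String × String} {l : List String} (h : q ∈ pvAdj l) : q.2 ∈ l := by
  have := List.of_mem_zip (show (q.1, q.2) ∈ l.zip (l.drop 1) from by simpa [pvAdj] using h)
  exact List.mem_of_mem_drop this.2

theorem pvA_mergeGo_eq (symbols : List String) (pair : String × String) :
    ∀ n i merged, symbols.length - i ≤ n →
      pvA_mergeGo symbols pair n merged i = merged ++ pvMergeSpec pair.1 pair.2 (symbols.drop i) := by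
  intro n
  induction n with
  | zero =>
    intro i merged h
    rw [List.drop_eq_nil_of_le (by omega)]
    simp [pvA_mergeGo, pvMergeSpec]
  | succ n ih =>
    intro i merged h
    rw [pvA_mergeGo]
    by_cases hi : i < symbols.length
    · rw [if_pos hi]
      have hd : symbols.drop i = symbols[i] :: symbols.drop (i+1) := List.drop_eq_getElem_cons hi
      have g1 : symbols.getD i "" = symbols[i] := List.getD_eq_getElem _ _ hi
      by_cases hc : i < symbols.length - 1 ∧ (symbols.getD i "", symbols.getD (i+1) "") = pair
      · obtain ⟨hlt, hpair⟩ := hc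
        have hi1 : i + 1 < symbols.length := by omega
        have hd1 : symbols.drop (i+1) = symbols[i+1] :: symbols.drop (i+2) := List.drop_eq_getElem_cons hi1
        have g2 : symbols.getD (i+1) "" = symbols[i+1] := List.getD_eq_getElem _ _ hi1
        have hx : symbols[i] = pair.1 := g1 ▸ congrArg Prod.fst hpair
        have hy : symbols[i+1] = pair.2 := g2 ▸ congrArg Prod.snd hpair
        rw [if_pos ⟨hlt, hpair⟩, ih (i+2) _ (by omega), hd, hd1, g1, g2]
        simp [pvMergeSpec, hx, hy]
      · rw [if_neg hc, ih (i+1) _ (by omega), hd, g1]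
        cases hdd : symbols.drop (i+1) with
        | nil => simp [pvMergeSpec]
        | cons y rest =>
          have hi1 : i + 1 < symbols.length := by
            by_contra hx
            rw [List.drop_eq_nil_of_le (by omega)] at hdd
            exact (List.cons_ne_nil _ _) hdd.symm
          have hlt : i < symbols.length - 1 := by omega
          have g2 : symbols.getD (i+1) "" = symbols[i+1] := List.getD_eq_getElem _ _ hi1
          have hy : y = symbols[i+1] := by
            have := (List.drop_eq_getElem_cons hi1).symm.trans hdd
            exact (List.cons.injEq _ _ _ _ ▸ this).1.symm
          have hcond : ¬ (symbols[i] = pair.1 ∧ y = pair.2) := by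
            intro ⟨h1, h2⟩
            exact hc ⟨hlt, by rw [g1, g2, h1, ← hy, h2]⟩
          simp [pvMergeSpec, hcond]
    · rw [if_neg hi, List.drop_eq_nil_of_le (by omega)]
      simp [pvMergeSpec]

theorem pv_candidates_zip {γ : Type} (f : String → String → Option γ) :
    ∀ l : List String,
      (List.range (l.length - 1)).filterMap (fun i => f (l.getD i "") (l.getD (i+1) "")) =
      (l.zip (l.drop 1)).filterMap (fun p => f p.1 p.2) := by
  intro l
  induction l with
  | nil => simp
  | cons x l' ih =>
    cases l' with
    | nil => simp
    | cons y t =>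
      have hlen : (x :: y :: t : List String).length - 1 = t.length + 1 := by simp
      rw [hlen, List.range_succ_eq_map, List.filterMap_cons, List.filterMap_map]
      have hfun : ((fun i => f ((x :: y :: t).getD i "") ((x :: y :: t).getD (i+1) "")) ∘ Nat.succ)
          = fun i => f ((y :: t).getD i "") ((y :: t).getD (i+1) "") := by
        funext i
        simp [Function.comp]
      rw [hfun]
      have ih' := ih
      rw [show (y :: t : List String).length - 1 = t.length by simp] at ih'
      rw [ih']
      show _ = ((x, y) :: (y :: t).zip t).filterMap (fun p => f p.1 p.2)
      rw [List.filterMap_cons]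
      simp only [List.getD_cons_zero, List.getD_cons_succ]
      rfl

theorem pvA_candidates_eq (symbols : List String) (mr : List (List String × Int)) :
    pvA_candidates symbols mr = (pvAdj symbols).filterMap (pvCandF mr) := by
  exact pv_candidates_zip (fun u v =>
    match PySem.Dict.get? (PySem.Dict.mk mr) [u, v] with
    | some rank => some (rank, u, v)
    | none => none) symbols

theorem pvMergeSpec_ne_empty (a b : String) :
    ∀ l : List String, (∀ x ∈ l, x ≠ "") → ∀ z ∈ pvMergeSpec a b l, z ≠ "" := by
  suffices h : ∀ n (l : List String), l.length ≤ n → (∀ x ∈ l, x ≠ "") → ∀ z ∈ pvMergeSpec a b l, z ≠ "" by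
    intro l; exact h l.length l le_rfl
  intro n
  induction n with
  | zero =>
    intro l hl _
    have : l = [] := List.length_eq_zero_iff.mp (by omega)
    subst this; simp [pvMergeSpec]
  | succ n ih =>
    intro l hl hinv
    match l with
    | [] => simp [pvMergeSpec]
    | [x] => simpa [pvMergeSpec] using hinv x (by simp)
    | x :: y :: rest =>
      intro z hz
      rw [pvMergeSpec] at hz
      by_cases hc : x = a ∧ y = b
      · rw [if_pos hc] at hz
        rcases List.mem_cons.mp hz with h | h
        · subst h
          have hxne : x ≠ "" := hinv x (by simp)
          rw [← hc.1, ← hc.2]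
          exact pv_append_ne_empty x y hxne
        · exact ih rest (by simp at hl ⊢; omega) (fun u hu => hinv u (by simp [hu])) z h
      · rw [if_neg hc] at hz
        rcases List.mem_cons.mp hz with h | h
        · subst h; exact hinv z (by simp)
        · exact ih (y :: rest) (by simp at hl ⊢; omega) (fun u hu => hinv u (by simp at hu ⊢; tauto)) z h

-- ---------- _insort = ordered insertion ----------

theorem pv_take_takeWhile {α : Type} (p : α → Bool) (l : List α) :
    l.take (l.takeWhile p).length = l.takeWhile p := by
  induction l with
  | nil => simp
  | cons x xs ih => by_cases h : p x <;> simp [h, ih]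

theorem pv_drop_takeWhile {α : Type} (p : α → Bool) (l : List α) :
    l.drop (l.takeWhile p).length = l.dropWhile p := by
  induction l with
  | nil => simp
  | cons x xs ih => by_cases h : p x <;> simp [List.dropWhile_cons, h, ih]

theorem pvB_insortGo_eq (item : Int × (String × String)) :
    ∀ n (ag : List (Int × (String × String))) (k : Nat), ag.length - k ≤ n →
      pvB_insortGo ag item n k = k + ((ag.drop k).takeWhile (fun x => decide (x.1 ≤ item.1))).length := by
  intro n
  induction n with
  | zero =>
    intro ag k h
    rw [List.drop_eq_nil_of_le (by omega)]
    simp [pvB_insortGo]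
  | succ n ih =>
    intro ag k h
    rw [pvB_insortGo]
    by_cases hk : k < ag.length
    · have hd : ag.drop k = ag[k] :: ag.drop (k+1) := List.drop_eq_getElem_cons hk
      have g1 : ag.getD k (0, ("", "")) = ag[k] := List.getD_eq_getElem _ _ hk
      by_cases hle : (ag.getD k (0, ("", ""))).1 ≤ item.1
      · rw [if_pos ⟨hk, hle⟩, ih ag (k+1) (by omega), hd]
        rw [g1] at hle
        rw [List.takeWhile_cons_of_pos (by simpa using hle)]
        simp
        omega
      · rw [if_neg (by tauto), hd]
        rw [g1] at hle
        rw [List.takeWhile_cons_of_neg (by simpa using hle)]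
        simp
    · rw [if_neg (by tauto), List.drop_eq_nil_of_le (by omega)]
      simp

theorem pvB_insort_eq (ag : List (Int × (String × String))) (item : Int × (String × String)) :
    pvB_insort ag item = pvSIns item ag := by
  unfold pvB_insort
  rw [pvB_insortGo_eq item ag.length ag 0 (by omega)]
  simp only [List.drop_zero, Nat.zero_add]
  rw [PySem.List.insert_natCast ag _ item (List.takeWhile_prefix _).length_le]
  rw [pv_take_takeWhile, pv_drop_takeWhile]
  induction ag with
  | nil => simp [pvSIns]
  | cons x xs ih =>
    by_cases h : x.1 ≤ item.1 <;> simp [pvSIns, List.takeWhile_cons, List.dropWhile_cons, h] <;>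
      simpa using ih

theorem pvSIns_mem (item x : Int × (String × String)) (l : List (Int × (String × String))) :
    x ∈ pvSIns item l ↔ x = item ∨ x ∈ l := by
  induction l with
  | nil => simp [pvSIns]
  | cons y ys ih =>
    by_cases h : y.1 ≤ item.1 <;> simp [pvSIns, h, ih] <;> tauto

theorem pvSIns_length (item : Int × (String × String)) (l : List (Int × (String × String))) :
    (pvSIns item l).length = l.length + 1 := by
  induction l with
  | nil => simp [pvSIns]
  | cons y ys ih => by_cases h : y.1 ≤ item.1 <;> simp [pvSIns, h, ih]

theorem pvSIns_sorted (item : Int × (String × String)) (l : List (Int × (String × String)))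
    (h : l.Pairwise (fun e f => e.1 ≤ f.1)) :
    (pvSIns item l).Pairwise (fun e f => e.1 ≤ f.1) := by
  induction l with
  | nil => simp [pvSIns]
  | cons y ys ih =>
    rcases List.pairwise_cons.mp h with ⟨hy, hys⟩
    by_cases hle : y.1 ≤ item.1
    · rw [pvSIns, if_pos hle]
      refine List.pairwise_cons.mpr ⟨?_, ih hys⟩
      intro z hz
      rcases (pvSIns_mem item z ys).mp hz with h1 | h1
      · rw [h1]; exact hle
      · exact hy z h1
    · rw [pvSIns, if_neg hle]
      refine List.pairwise_cons.mpr ⟨?_, h⟩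
      intro z hz
      rcases List.mem_cons.mp hz with h1 | h1
      · rw [h1]; omega
      · exact le_trans (by omega) (hy z h1)

theorem pv_foldl_insort_mem (items : List (Int × (String × String))) :
    ∀ (ag : List (Int × (String × String))) (x : Int × (String × String)),
      x ∈ items.foldl (fun ag item => pvB_insort ag item) ag ↔ x ∈ ag ∨ x ∈ items := by
  induction items with
  | nil => simp
  | cons it its ih =>
    intro ag x
    rw [List.foldl_cons, ih, pvB_insort_eq, pvSIns_mem]
    simp
    tauto

theorem pv_foldl_insort_sorted (items : List (Int × (String × String))) :
    ∀ (ag : List (Int × (String × String))),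
      ag.Pairwise (fun e f => e.1 ≤ f.1) →
      (items.foldl (fun ag item => pvB_insort ag item) ag).Pairwise (fun e f => e.1 ≤ f.1) := by
  induction items with
  | nil => intro ag h; simpa using h
  | cons it its ih =>
    intro ag h
    rw [List.foldl_cons]
    exact ih _ (by rw [pvB_insort_eq]; exact pvSIns_sorted it ag h)

theorem pv_foldl_insort_length (items : List (Int × (String × String))) :
    ∀ (ag : List (Int × (String × String))),
      (items.foldl (fun ag item => pvB_insort ag item) ag).length = ag.length + items.length := by
  induction items with
  | nil => simp
  | cons it its ih =>
    intro ag
    rw [List.foldl_cons, ih, pvB_insort_eq, pvSIns_length]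
    simp
    omega

-- ---------- _find_rank_pair = find? over adjacent pairs ----------

theorem pvB_findGo_eq (s : List String) (mr : List (List String × Int)) (r0 : Int) :
    ∀ n i, s.length - i ≤ n →
      pvB_findGo s mr r0 n i =
        ((s.drop i).zip (s.drop (i+1))).find? (fun q => pvRkB mr q == some r0) := by
  intro n
  induction n with
  | zero =>
    intro i h
    have : ((s.drop i).zip (s.drop (i+1))).length = 0 := by
      rw [List.length_zip, List.length_drop, List.length_drop]
      omega
    rw [List.eq_nil_of_length_eq_zero this]
    simp [pvB_findGo]
  | succ n ih =>
    intro i h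
    rw [pvB_findGo]
    by_cases hi : i < s.length - 1
    · rw [if_pos hi]
      have hlt : i < s.length := by omega
      have hlt1 : i + 1 < s.length := by omega
      have hd : s.drop i = s[i] :: s.drop (i+1) := List.drop_eq_getElem_cons hlt
      have hd1 : s.drop (i+1) = s[i+1] :: s.drop (i+2) := List.drop_eq_getElem_cons hlt1
      have g1 : s.getD i "" = s[i] := List.getD_eq_getElem _ _ hlt
      have g2 : s.getD (i+1) "" = s[i+1] := List.getD_eq_getElem _ _ hlt1
      rw [g1, g2]
      conv_rhs => rw [hd, hd1]
      rw [List.zip_cons_cons]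
      by_cases hrk : pvRkB mr (s[i], s[i+1]) = some r0
      · rw [if_pos hrk, List.find?_cons_of_pos (by simp [hrk])]
      · rw [if_neg hrk, List.find?_cons_of_neg (by simp [hrk]), ih (i+1) (by omega), hd1]
    · rw [if_neg hi]
      have : ((s.drop i).zip (s.drop (i+1))).length = 0 := by
        rw [List.length_zip, List.length_drop, List.length_drop]
        omega
      rw [List.eq_nil_of_length_eq_zero this]
      simp

-- ---------- _merge_collect = pvMC, and pvMC's properties ----------

theorem pvMC_merge (mr : List (List String × Int)) (a b x y : String) (last : Option String)
    (rest : List String) (hc : x = a ∧ y = b) :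
    pvMC mr a b last (x :: y :: rest) =
      ((a ++ b) :: (pvMC mr a b (some (a ++ b)) rest).1,
       pvN1 mr (a ++ b) last ++ pvN2 mr (a ++ b) rest.head? ++ (pvMC mr a b (some (a ++ b)) rest).2) := by
  rw [pvMC, if_pos hc]

theorem pvMC_nomerge (mr : List (List String × Int)) (a b x y : String) (last : Option String)
    (rest : List String) (hc : ¬ (x = a ∧ y = b)) :
    pvMC mr a b last (x :: y :: rest) =
      (x :: (pvMC mr a b (some x) (y :: rest)).1, (pvMC mr a b (some x) (y :: rest)).2) := by
  rw [pvMC, if_neg hc]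

theorem pvN1_len (mr : List (List String × Int)) (ab : String) (last : Option String) :
    (pvN1 mr ab last).length ≤ 1 := by
  cases last with
  | none => simp [pvN1]
  | some z => cases h : pvRkB mr (z, ab) <;> simp [pvN1, h]

theorem pvN2_len (mr : List (List String × Int)) (ab : String) (h? : Option String) :
    (pvN2 mr ab h?).length ≤ 1 := by
  cases h? with
  | none => simp [pvN2]
  | some z => cases h : pvRkB mr (ab, z) <;> simp [pvN2, h]

theorem pvN1_mem (mr : List (List String × Int)) (ab : String) (last : Option String)
    (e : Int × (String × String)) (he : e ∈ pvN1 mr ab last) :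
    pvRkB mr e.2 = some e.1 ∧ ∃ z, last = some z ∧ e.2 = (z, ab) := by
  cases last with
  | none => simp [pvN1] at he
  | some z =>
    cases h : pvRkB mr (z, ab) with
    | none => simp [pvN1, h] at he
    | some r =>
      simp [pvN1, h] at he
      subst he
      exact ⟨h, z, rfl, rfl⟩

theorem pvN2_mem (mr : List (List String × Int)) (ab : String) (h? : Option String)
    (e : Int × (String × String)) (he : e ∈ pvN2 mr ab h?) :
    pvRkB mr e.2 = some e.1 ∧ ∃ z, h? = some z ∧ e.2 = (ab, z) := by
  cases h? with
  | none => simp [pvN2] at he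
  | some z =>
    cases h : pvRkB mr (ab, z) with
    | none => simp [pvN2, h] at he
    | some r =>
      simp [pvN2, h] at he
      subst he
      exact ⟨h, z, rfl, rfl⟩

theorem pvN1_mem_of_rk (mr : List (List String × Int)) (ab : String) (z : String) (r : Int)
    (h : pvRkB mr (z, ab) = some r) : (r, (z, ab)) ∈ pvN1 mr ab (some z) := by
  simp [pvN1, h]

theorem pvN2_mem_of_rk (mr : List (List String × Int)) (ab : String) (z : String) (r : Int)
    (h : pvRkB mr (ab, z) = some r) : (r, (ab, z)) ∈ pvN2 mr ab (some z) := by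
  simp [pvN2, h]

theorem pvB_mcGo_eq (l : List String) (q : String × String) (mr : List (List String × Int)) :
    ∀ n (out : List String) (nw : List (Int × (String × String))) (i : Nat), l.length - i ≤ n →
      pvB_mcGo l q mr n out nw i =
        (out ++ (pvMC mr q.1 q.2 out.getLast? (l.drop i)).1,
         nw ++ (pvMC mr q.1 q.2 out.getLast? (l.drop i)).2) := by
  intro n
  induction n with
  | zero =>
    intro out nw i h
    rw [List.drop_eq_nil_of_le (by omega)]
    simp [pvB_mcGo, pvMC]
  | succ n ih =>
    intro out nw i h
    rw [pvB_mcGo]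
    by_cases hi : i < l.length
    · rw [if_pos hi]
      have hd : l.drop i = l[i] :: l.drop (i+1) := List.drop_eq_getElem_cons hi
      have g1 : l.getD i "" = l[i] := List.getD_eq_getElem _ _ hi
      by_cases hc : i < l.length - 1 ∧ l.getD i "" = q.1 ∧ l.getD (i+1) "" = q.2
      · obtain ⟨hlt, hx, hy⟩ := hc
        have hi1 : i + 1 < l.length := by omega
        have hd1 : l.drop (i+1) = l[i+1] :: l.drop (i+2) := List.drop_eq_getElem_cons hi1
        have g2 : l.getD (i+1) "" = l[i+1] := List.getD_eq_getElem _ _ hi1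
        rw [if_pos ⟨hlt, hx, hy⟩, ih _ _ (i+2) (by omega)]
        conv_rhs => rw [hd, hd1]
        rw [pvMC_merge mr q.1 q.2 _ _ _ _ ⟨by rw [← g1, hx], by rw [← g2, hy]⟩]
        have hlast : (out ++ [q.1 ++ q.2]).getLast? = some (q.1 ++ q.2) := by simp
        rw [hlast]
        have hn1 : (match out.getLast? with
              | none => nw
              | some x => match pvRkB mr (x, q.1 ++ q.2) with
                | none => nw | some r => nw ++ [(r, (x, q.1 ++ q.2))])
            = nw ++ pvN1 mr (q.1 ++ q.2) out.getLast? := by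
          cases out.getLast? with
          | none => simp [pvN1]
          | some z => cases hr : pvRkB mr (z, q.1 ++ q.2) <;> simp [pvN1, hr]
        have hhead : (l.drop (i+2)).head? = if h2 : i + 2 < l.length then some l[i+2] else none := by
          by_cases h2 : i + 2 < l.length
          · rw [dif_pos h2, List.drop_eq_getElem_cons h2]; rfl
          · rw [dif_neg h2, List.drop_eq_nil_of_le (by omega)]; rfl
        have hn2 : (if i + 2 < l.length then
              match pvRkB mr (q.1 ++ q.2, l.getD (i+2) "") with
              | none => nw ++ pvN1 mr (q.1 ++ q.2) out.getLast?
              | some r => nw ++ pvN1 mr (q.1 ++ q.2) out.getLast? ++ [(r, (q.1 ++ q.2, l.getD (i+2) ""))]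
            else nw ++ pvN1 mr (q.1 ++ q.2) out.getLast?)
            = nw ++ pvN1 mr (q.1 ++ q.2) out.getLast? ++ pvN2 mr (q.1 ++ q.2) (l.drop (i+2)).head? := by
          rw [hhead]
          by_cases h2 : i + 2 < l.length
          · have g3 : l.getD (i+2) "" = l[i+2] := List.getD_eq_getElem _ _ h2
            rw [if_pos h2, dif_pos h2, g3]
            cases hr : pvRkB mr (q.1 ++ q.2, l[i+2]) <;> simp [pvN2, hr]
          · rw [if_neg h2, dif_neg h2]
            simp [pvN2]
        rw [hn1, hn2]
        simp
      · rw [if_neg hc, ih _ _ (i+1) (by omega)]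
        conv_rhs => rw [hd]
        rw [g1]
        have hlast : (out ++ [l[i]]).getLast? = some l[i] := by simp
        rw [hlast]
        cases hdd : l.drop (i+1) with
        | nil =>
          rw [pvMC, pvMC]
          simp
        | cons y rest =>
          have hi1 : i + 1 < l.length := by
            by_contra hx
            rw [List.drop_eq_nil_of_le (by omega)] at hdd
            exact (List.cons_ne_nil _ _) hdd.symm
          have hlt : i < l.length - 1 := by omega
          have g2 : l.getD (i+1) "" = l[i+1] := List.getD_eq_getElem _ _ hi1
          have hy : y = l[i+1] := by
            have := (List.drop_eq_getElem_cons hi1).symm.trans hdd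
            exact (List.cons.injEq _ _ _ _ ▸ this).1.symm
          have hcond : ¬ (l[i] = q.1 ∧ y = q.2) := by
            intro ⟨h1, h2⟩
            exact hc ⟨hlt, by rw [g1, h1], by rw [g2, ← hy, h2]⟩
          rw [pvMC_nomerge mr q.1 q.2 _ _ _ _ hcond]
          simp
    · rw [if_neg hi, List.drop_eq_nil_of_le (by omega)]
      simp [pvMC]

theorem pvMC_fst (mr : List (List String × Int)) (a b : String) :
    ∀ (last : Option String) (l : List String), (pvMC mr a b last l).1 = pvMergeSpec a b l := by
  intro last l
  induction last, l using pvMC.induct mr a b with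
  | case1 last => simp [pvMC, pvMergeSpec]
  | case2 last x => simp [pvMC, pvMergeSpec]
  | case3 last x y rest hc ih =>
    rw [pvMC_merge mr a b x y last rest hc, pvMergeSpec, if_pos hc]
    simpa using ih
  | case4 last x y rest hc ih =>
    rw [pvMC_nomerge mr a b x y last rest hc, pvMergeSpec, if_neg hc]
    simpa using ih

theorem pvMC_len (mr : List (List String × Int)) (a b : String) :
    ∀ (last : Option String) (l : List String),
      (pvMC mr a b last l).2.length + 2 * (pvMC mr a b last l).1.length ≤ 2 * l.length := by
  intro last l
  induction last, l using pvMC.induct mr a b with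
  | case1 last => simp [pvMC]
  | case2 last x => simp [pvMC]
  | case3 last x y rest hc ih =>
    rw [pvMC_merge mr a b x y last rest hc]
    have h1 := pvN1_len mr (a ++ b) last
    have h2 := pvN2_len mr (a ++ b) rest.head?
    simp only [List.length_cons, List.length_append]
    omega
  | case4 last x y rest hc ih =>
    rw [pvMC_nomerge mr a b x y last rest hc]
    simp only [List.length_cons] at ih ⊢
    omega

theorem pvMC_truthful (mr : List (List String × Int)) (a b : String) :
    ∀ (last : Option String) (l : List String),
      ∀ e ∈ (pvMC mr a b last l).2, pvRkB mr e.2 = some e.1 := by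
  intro last l
  induction last, l using pvMC.induct mr a b with
  | case1 last => simp [pvMC]
  | case2 last x => simp [pvMC]
  | case3 last x y rest hc ih =>
    intro e he
    rw [pvMC_merge mr a b x y last rest hc] at he
    simp only [List.mem_append] at he
    rcases he with (he | he) | he
    · exact (pvN1_mem mr _ _ _ he).1
    · exact (pvN2_mem mr _ _ _ he).1
    · exact ih e he
  | case4 last x y rest hc ih =>
    intro e he
    rw [pvMC_nomerge mr a b x y last rest hc] at he
    exact ih e he

theorem pvOptCons_none (l : List String) : pvOptCons none l = l := rfl
theorem pvOptCons_some (z : String) (l : List String) : pvOptCons (some z) l = z :: l := rfl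

theorem pv_adj_cons_sub {q : String × String} {t : List String} (x : String)
    (h : q ∈ pvAdj t) : q ∈ pvAdj (x :: t) := by
  cases t with
  | nil => simp [pvAdj_nil] at h
  | cons y t' => rw [pvAdj_cons2]; exact List.mem_cons_of_mem _ h

theorem pv_adj_head {q : String × String} {x : String} {t : List String}
    (h : q ∈ pvAdj (x :: t)) : (∃ z, t.head? = some z ∧ q = (x, z)) ∨ q ∈ pvAdj t := by
  cases t with
  | nil => simp [pvAdj_single] at h
  | cons y t' =>
    rw [pvAdj_cons2] at h
    rcases List.mem_cons.mp h with h | h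
    · exact Or.inl ⟨y, rfl, h⟩
    · exact Or.inr h

theorem pvMC_complete (mr : List (List String × Int)) (a b : String) :
    ∀ (last : Option String) (l : List String),
      ∀ q r, q ∈ pvAdj (pvOptCons last (pvMC mr a b last l).1) → pvRkB mr q = some r →
        q ∈ pvAdj (pvOptCons last l) ∨ (r, q) ∈ (pvMC mr a b last l).2 := by
  intro last l
  induction last, l using pvMC.induct mr a b with
  | case1 last =>
    intro q r hq _
    rw [pvMC] at hq ⊢
    exact Or.inl hq
  | case2 last x =>
    intro q r hq _
    rw [pvMC] at hq ⊢
    exact Or.inl hq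
  | case3 last x y rest hc ih =>
    intro q r hq hrk
    rw [pvMC_merge mr a b x y last rest hc] at hq ⊢
    simp only [List.mem_append]
    -- split off the optional (last, a++b) pair
    have hsplit : (∃ z, last = some z ∧ q = (z, a ++ b)) ∨
        q ∈ pvAdj ((a ++ b) :: (pvMC mr a b (some (a ++ b)) rest).1) := by
      cases last with
      | none => exact Or.inr hq
      | some z =>
        rw [pvOptCons_some] at hq
        rcases pv_adj_head hq with ⟨w, hw, hqw⟩ | h
        · simp only [List.head?_cons, Option.some.injEq] at hw
          exact Or.inl ⟨z, rfl, by rw [hqw, hw]⟩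
        · exact Or.inr h
    rcases hsplit with ⟨z, hz, hqz⟩ | hmem
    · subst hz
      right; left; left
      rw [hqz] at hrk ⊢
      exact pvN1_mem_of_rk mr (a ++ b) z r hrk
    · have := ih q r (by rw [pvOptCons_some]; exact hmem) hrk
      rcases this with h | h
      · rw [pvOptCons_some] at h
        rcases pv_adj_head h with ⟨z, hz, hqz⟩ | h2
        · right; left; right
          rw [hqz] at hrk ⊢
          rw [hz]
          exact pvN2_mem_of_rk mr (a ++ b) z r hrk
        · left
          cases last with
          | none =>
            rw [pvOptCons_none]
            exact pv_adj_cons_sub x (pv_adj_cons_sub y h2)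
          | some z =>
            rw [pvOptCons_some]
            exact pv_adj_cons_sub z (pv_adj_cons_sub x (pv_adj_cons_sub y h2))
      · right; right
        exact h
  | case4 last x y rest hc ih =>
    intro q r hq hrk
    rw [pvMC_nomerge mr a b x y last rest hc] at hq ⊢
    have hsplit : (∃ z, last = some z ∧ q = (z, x)) ∨
        q ∈ pvAdj (x :: (pvMC mr a b (some x) (y :: rest)).1) := by
      cases last with
      | none => exact Or.inr hq
      | some z =>
        rw [pvOptCons_some] at hq
        rcases pv_adj_head hq with ⟨w, hw, hqw⟩ | h
        · simp only [List.head?_cons, Option.some.injEq] at hw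
          exact Or.inl ⟨z, rfl, by rw [hqw, hw]⟩
        · exact Or.inr h
    rcases hsplit with ⟨z, hz, hqz⟩ | hmem
    · subst hz
      left
      rw [pvOptCons_some, pvAdj_cons2, hqz]
      exact List.mem_cons_self
    · have := ih q r (by rw [pvOptCons_some]; exact hmem) hrk
      rcases this with h | h
      · left
        rw [pvOptCons_some] at h
        cases last with
        | none => rw [pvOptCons_none]; exact h
        | some z => rw [pvOptCons_some]; exact pv_adj_cons_sub z h
      · exact Or.inr h

theorem pvMC_no_reoccur (mr : List (List String × Int)) (a b : String) (ha : a ≠ "") (hb : b ≠ "") :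
    ∀ (last : Option String) (l : List String),
      (∀ z, last = some z → z = a → l.head? ≠ some b) →
      (a, b) ∉ pvAdj (pvOptCons last (pvMC mr a b last l).1) := by
  intro last l
  induction last, l using pvMC.induct mr a b with
  | case1 last =>
    intro _ hq
    rw [pvMC] at hq
    cases last with
    | none => simp [pvOptCons_none, pvAdj_nil] at hq
    | some z => simp [pvOptCons_some, pvAdj_single] at hq
  | case2 last x =>
    intro hlast hq
    rw [pvMC] at hq
    cases last with
    | none => simp [pvOptCons_none, pvAdj_single] at hq
    | some z =>
      rw [pvOptCons_some, pvAdj_cons2] at hq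
      rcases List.mem_cons.mp hq with h | h
      · have hza : a = z := congrArg Prod.fst h
        have hxb : b = x := congrArg Prod.snd h
        exact hlast z rfl hza.symm (by simp [hxb])
      · simp [pvAdj_single] at h
  | case3 last x y rest hc ih =>
    intro hlast hq
    rw [pvMC_merge mr a b x y last rest hc] at hq
    have hmem : (a, b) ∈ pvAdj ((a ++ b) :: (pvMC mr a b (some (a ++ b)) rest).1) := by
      cases last with
      | none => exact hq
      | some z =>
        rw [pvOptCons_some] at hq
        rcases pv_adj_head hq with ⟨w, hw, hqw⟩ | h
        · simp only [List.head?_cons, Option.some.injEq] at hw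
          have hwb : b = w := congrArg Prod.snd hqw
          exact absurd (hwb.trans hw.symm).symm (pv_append_left_ne a b ha)
        · exact h
    have hlast' : ∀ z, some (a ++ b) = some z → z = a → rest.head? ≠ some b := by
      intro z hz hza _
      have h1 : a ++ b = z := by injection hz
      rw [hza] at h1
      exact pv_append_right_ne a b hb h1
    have := ih hlast'
    rw [pvOptCons_some] at this
    exact this hmem
  | case4 last x y rest hc ih =>
    intro hlast hq
    rw [pvMC_nomerge mr a b x y last rest hc] at hq
    have hmem : (a, b) ∈ pvAdj (x :: (pvMC mr a b (some x) (y :: rest)).1) := by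
      cases last with
      | none => exact hq
      | some z =>
        rw [pvOptCons_some] at hq
        rcases pv_adj_head hq with ⟨w, hw, hqw⟩ | h
        · simp only [List.head?_cons, Option.some.injEq] at hw
          have hza : a = z := congrArg Prod.fst hqw
          have hwb : b = w := congrArg Prod.snd hqw
          exact absurd (show (x :: y :: rest : List String).head? = some b by
            simp [hw.trans hwb.symm]) (hlast z rfl hza.symm)
        · exact h
    have hlast' : ∀ z, some x = some z → z = a → (y :: rest).head? ≠ some b := by
      intro z hz hza heq
      injection hz with h1
      injection heq with h2
      exact hc ⟨by rw [h1, hza], h2⟩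
    have := ih hlast'
    rw [pvOptCons_some] at this
    exact this hmem

-- ---------- selection: the agenda head picks A's min-rank candidate ----------

def pvStep : Option (Int × String × String) → (Int × String × String) → Option (Int × String × String) :=
  fun acc x => match acc with
    | none => some x
    | some m => if x.1 < m.1 then some x else some m

theorem pv_min?_eq_foldl (cs : List (Int × String × String)) :
    PySem.List.min? cs (fun item => item.1) = cs.foldl pvStep none := by
  rw [PySem.List.min?]
  congr 1
  funext acc x
  cases acc <;> rfl

theorem pv_foldl_step_keep (m : Int × String × String) :
    ∀ cs : List (Int × String × String), (∀ x ∈ cs, ¬ x.1 < m.1) →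
      cs.foldl pvStep (some m) = some m := by
  intro cs
  induction cs with
  | nil => intro _; rfl
  | cons c cs ih =>
    intro h
    rw [List.foldl_cons]
    have : pvStep (some m) c = some m := by
      simp only [pvStep, if_neg (h c (by simp))]
    rw [this]
    exact ih (fun x hx => h x (by simp [hx]))

theorem pv_foldl_step_first (r0 : Int) :
    ∀ (cs : List (Int × String × String)) (acc : Option (Int × String × String))
      (c0 : Int × String × String),
      (∀ x ∈ cs, r0 ≤ x.1) →
      (acc = none ∨ ∃ m, acc = some m ∧ r0 < m.1) →
      cs.find? (fun c => c.1 == r0) = some c0 →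
      cs.foldl pvStep acc = some c0 := by
  intro cs
  induction cs with
  | nil => intro acc c0 _ _ hf; simp at hf
  | cons c cs ih =>
    intro acc c0 hge hacc hf
    by_cases hc : c.1 = r0
    · rw [List.find?_cons_of_pos (by simp [hc])] at hf
      have hc0 : c = c0 := by injection hf
      subst hc0
      have hstep : pvStep acc c = some c := by
        rcases hacc with h | ⟨m, hm, hmlt⟩
        · rw [h]; rfl
        · rw [hm]
          simp only [pvStep]
          rw [if_pos (by omega)]
      rw [List.foldl_cons, hstep]
      exact pv_foldl_step_keep c cs (fun x hx => by have := hge x (by simp [hx]); omega)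
    · rw [List.find?_cons_of_neg (by simp [hc])] at hf
      rw [List.foldl_cons]
      apply ih _ c0 (fun x hx => hge x (by simp [hx])) _ hf
      have hgt : r0 < c.1 := by
        have := hge c (by simp)
        omega
      rcases hacc with h | ⟨m, hm, hmlt⟩
      · rw [h]; exact Or.inr ⟨c, rfl, hgt⟩
      · rw [hm]
        simp only [pvStep]
        by_cases hlt : c.1 < m.1
        · rw [if_pos hlt]; exact Or.inr ⟨c, rfl, hgt⟩
        · rw [if_neg hlt]; exact Or.inr ⟨m, rfl, hmlt⟩

theorem pvCandF_eq (mr : List (List String × Int)) (p : String × String) :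
    pvCandF mr p = match pvRkB mr p with
      | some rank => some (rank, p.1, p.2)
      | none => none := rfl

theorem pv_find_filterMap (mr : List (List String × Int)) (r0 : Int) :
    ∀ (qs : List (String × String)) (q0 : String × String),
      qs.find? (fun q => pvRkB mr q == some r0) = some q0 →
      (qs.filterMap (pvCandF mr)).find? (fun c => c.1 == r0) = some (r0, q0.1, q0.2) := by
  intro qs
  induction qs with
  | nil => intro q0 hf; simp at hf
  | cons q qs ih =>
    intro q0 hf
    rw [List.filterMap_cons, pvCandF_eq]
    cases hg : pvRkB mr q with
    | none =>
      rw [List.find?_cons_of_neg (by simp [hg])] at hf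
      exact ih q0 hf
    | some r =>
      by_cases hr : r = r0
      · subst hr
        rw [List.find?_cons_of_pos (by simp [hg])] at hf
        have hq0 : q0 = q := by injection hf with h; exact h.symm
        subst hq0
        rw [List.find?_cons_of_pos (by simp)]
      · rw [List.find?_cons_of_neg (by simp [hg, hr])] at hf
        rw [List.find?_cons_of_neg (by simp [hr])]
        exact ih q0 hf

theorem pv_min?_of_scan (mr : List (List String × Int)) (s : List String) (r0 : Int)
    (q0 : String × String)
    (Hmin : ∀ q r, q ∈ pvAdj s → pvRkB mr q = some r → r0 ≤ r)
    (hscan : (pvAdj s).find? (fun q => pvRkB mr q == some r0) = some q0) :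
    PySem.List.min? (pvA_candidates s mr) (fun item => item.1) = some (r0, q0.1, q0.2) := by
  rw [pvA_candidates_eq, pv_min?_eq_foldl]
  apply pv_foldl_step_first r0 _ none _ _ (Or.inl rfl) (pv_find_filterMap mr r0 _ q0 hscan)
  intro x hx
  rcases List.mem_filterMap.mp hx with ⟨q, hq, hcf⟩
  rw [pvCandF_eq] at hcf
  cases hg : pvRkB mr q with
  | none => rw [hg] at hcf; simp at hcf
  | some r =>
    rw [hg] at hcf
    simp at hcf
    have : x.1 = r := by rw [← hcf]
    rw [this]
    exact Hmin q r hq hg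

-- ---------- merge pass shortens the symbol list ----------

theorem pvMergeSpec_length_le (a b : String) :
    ∀ l : List String, (pvMergeSpec a b l).length ≤ l.length := by
  intro l
  induction l using pvMergeSpec.induct a b with
  | case1 => simp [pvMergeSpec]
  | case2 x => simp [pvMergeSpec]
  | case3 x y rest hc ih =>
    rw [pvMergeSpec, if_pos hc]
    simp only [List.length_cons]
    omega
  | case4 x y rest hc ih =>
    rw [pvMergeSpec, if_neg hc]
    simp only [List.length_cons] at ih ⊢
    omega

theorem pvMergeSpec_length_lt (a b : String) :
    ∀ l : List String, (a, b) ∈ pvAdj l → (pvMergeSpec a b l).length < l.length := by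
  intro l
  induction l using pvMergeSpec.induct a b with
  | case1 => intro h; simp [pvAdj_nil] at h
  | case2 x => intro h; simp [pvAdj_single] at h
  | case3 x y rest hc ih =>
    intro _
    rw [pvMergeSpec, if_pos hc]
    have := pvMergeSpec_length_le a b rest
    simp only [List.length_cons]
    omega
  | case4 x y rest hc ih =>
    intro h
    rw [pvAdj_cons2] at h
    rcases List.mem_cons.mp h with h | h
    · exact absurd ⟨(congrArg Prod.fst h).symm, (congrArg Prod.snd h).symm⟩ hc
    · rw [pvMergeSpec, if_neg hc]
      have := ih h
      simp only [List.length_cons] at this ⊢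
      omega

-- ---------- A-loop helpers ----------

theorem pvA_loop_zero (mr : List (List String × Int)) (s : List String) :
    pvA_loop mr 0 s = s := rfl

theorem pvA_loop_succ (mr : List (List String × Int)) (f : Nat) (s : List String) :
    pvA_loop mr (f+1) s =
      if 1 < s.length then
        match PySem.List.min? (pvA_candidates s mr) (fun item => item.1) with
        | none => s
        | some best => pvA_loop mr f (pvA_mergeGo s best.2 s.length [] 0)
      else s := rfl

theorem pvA_loop_no_cand (mr : List (List String × Int)) (s : List String)
    (h : pvA_candidates s mr = []) : ∀ f, pvA_loop mr f s = s := by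
  intro f
  cases f with
  | zero => rfl
  | succ f =>
    rw [pvA_loop_succ, h]
    have : PySem.List.min? ([] : List (Int × String × String)) (fun item => item.1) = none := by
      rw [pv_min?_eq_foldl]; rfl
    rw [this]
    by_cases hl : 1 < s.length <;> simp [hl]

theorem pvA_best_adj (mr : List (List String × Int)) (s : List String)
    (best : Int × String × String)
    (h : PySem.List.min? (pvA_candidates s mr) (fun item => item.1) = some best) :
    best.2 ∈ pvAdj s ∧ pvRkB mr best.2 = some best.1 := by
  have hmem := PySem.List.min?_mem h
  rw [pvA_candidates_eq] at hmem
  rcases List.mem_filterMap.mp hmem with ⟨q, hq, hcf⟩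
  rw [pvCandF_eq] at hcf
  cases hg : pvRkB mr q with
  | none => rw [hg] at hcf; simp at hcf
  | some r =>
    rw [hg] at hcf
    simp at hcf
    have h2 : best.2 = q := by rw [← hcf]
    have h1 : best.1 = r := by rw [← hcf]
    rw [h2, h1]
    exact ⟨hq, hg⟩

theorem pvA_mergeGo_spec (s : List String) (q : String × String) :
    pvA_mergeGo s q s.length [] 0 = pvMergeSpec q.1 q.2 s := by
  simpa using pvA_mergeGo_eq s q s.length 0 [] (by omega)

theorem pvA_loop_stable (mr : List (List String × Int)) :
    ∀ (n : Nat) (s : List String) (f1 f2 : Nat), s.length ≤ n → s.length ≤ f1 → s.length ≤ f2 →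
      pvA_loop mr f1 s = pvA_loop mr f2 s := by
  intro n
  induction n with
  | zero =>
    intro s f1 f2 hn _ _
    have hs : s = [] := List.length_eq_zero_iff.mp (by omega)
    subst hs
    cases f1 <;> cases f2 <;> simp [pvA_loop_zero, pvA_loop_succ]
  | succ n ih =>
    intro s f1 f2 hn h1 h2
    by_cases hl : 1 < s.length
    · have hf1 : 0 < f1 := by omega
      have hf2 : 0 < f2 := by omega
      obtain ⟨a, rfl⟩ : ∃ a, f1 = a + 1 := ⟨f1 - 1, by omega⟩
      obtain ⟨b, rfl⟩ : ∃ b, f2 = b + 1 := ⟨f2 - 1, by omega⟩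
      rw [pvA_loop_succ, pvA_loop_succ, if_pos hl, if_pos hl]
      cases hmin : PySem.List.min? (pvA_candidates s mr) (fun item => item.1) with
      | none => rfl
      | some best =>
        have hadj := (pvA_best_adj mr s best hmin).1
        have hlt : (pvMergeSpec best.2.1 best.2.2 s).length < s.length := by
          apply pvMergeSpec_length_lt
          have : (best.2.1, best.2.2) = best.2 := rfl
          rw [this]
          exact hadj
        show pvA_loop mr a (pvA_mergeGo s best.2 s.length [] 0) = pvA_loop mr b (pvA_mergeGo s best.2 s.length [] 0)
        rw [pvA_mergeGo_spec s best.2]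
        exact ih (pvMergeSpec best.2.1 best.2.2 s) a b (by omega) (by omega) (by omega)
    · cases f1 <;> cases f2 <;> simp [pvA_loop_zero, pvA_loop_succ, hl]

-- ---------- the initial agenda ----------

theorem pv_foldl_match_insort {ι : Type} (f : ι → Option Int) (h : ι → String × String) :
    ∀ (is : List ι) (ag : List (Int × (String × String))),
      is.foldl (fun ag i => match f i with | none => ag | some r => pvB_insort ag (r, h i)) ag
        = (is.filterMap (fun i => match f i with | none => none | some r => some (r, h i))).foldl
            (fun ag item => pvB_insort ag item) ag := by
  intro is
  induction is with
  | nil => intro ag; rfl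
  | cons i is ih =>
    intro ag
    rw [List.foldl_cons, List.filterMap_cons]
    cases hg : f i with
    | none => exact ih ag
    | some e => exact ih _

theorem pvB_init_eq (s : List String) (mr : List (List String × Int)) :
    pvB_init s mr =
      ((pvAdj s).filterMap (fun q => match pvRkB mr q with | none => none | some r => some (r, q))).foldl
        (fun ag item => pvB_insort ag item) [] := by
  unfold pvB_init
  rw [pv_foldl_match_insort (fun i => pvRkB mr (s.getD i "", s.getD (i+1) ""))
    (fun i => (s.getD i "", s.getD (i+1) ""))]
  congr 1
  exact pv_candidates_zip (fun u v =>
    match pvRkB mr (u, v) with | none => none | some r => some (r, (u, v))) s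

theorem pvInv_init (mr : List (List String × Int)) (s : List String)
    (h4 : ∀ x ∈ s, x ≠ "") : pvInv mr s (pvB_init s mr) := by
  rw [pvB_init_eq]
  refine ⟨pv_foldl_insort_sorted _ _ (by simp), ?_, ?_, h4⟩
  · intro q r hq hrk
    rw [pv_foldl_insort_mem]
    right
    exact List.mem_filterMap.mpr ⟨q, hq, by rw [hrk]⟩
  · intro e he
    rw [pv_foldl_insort_mem] at he
    rcases he with he | he
    · simp at he
    · rcases List.mem_filterMap.mp he with ⟨q, _, hcf⟩
      cases hg : pvRkB mr q with
      | none => rw [hg] at hcf; simp at hcf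
      | some r =>
        rw [hg] at hcf
        simp at hcf
        rw [← hcf]
        exact hg

-- ---------- the main simulation: B's agenda loop computes A's loop ----------

theorem pvB_loop_eq (mr : List (List String × Int)) :
    ∀ (fuel : Nat) (s : List String) (ag : List (Int × (String × String))),
      pvInv mr s ag → ag.length + 3 * s.length ≤ fuel →
      pvB_loop mr fuel s ag = pvA_loop mr s.length s := by
  intro fuel
  induction fuel with
  | zero =>
    intro s ag _ hfuel
    have hs : s.length = 0 := by omega
    rw [hs]
    rfl
  | succ fuel ih =>
    intro s ag hinv hfuel
    obtain ⟨hsort, hcompl, htruth, hne⟩ := hinv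
    cases ag with
    | nil =>
      have hcand : pvA_candidates s mr = [] := by
        rw [pvA_candidates_eq]
        rw [List.filterMap_eq_nil_iff]
        intro q hq
        rw [pvCandF_eq]
        cases hg : pvRkB mr q with
        | none => rfl
        | some r => exact absurd (hcompl q r hq hg) (by simp)
      rw [pvA_loop_no_cand mr s hcand]
      rfl
    | cons e rest =>
      obtain ⟨r0, p0⟩ := e
      have Hmin : ∀ q r, q ∈ pvAdj s → pvRkB mr q = some r → r0 ≤ r := by
        intro q r hq hg
        rcases List.mem_cons.mp (hcompl q r hq hg) with h | h
        · have : r = r0 := congrArg Prod.fst h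
          omega
        · have := (List.pairwise_cons.mp hsort).1 (r, q) h
          simpa using this
      have hscan := pvB_findGo_eq s mr r0 s.length 0 (by omega)
      simp only [List.drop_zero] at hscan
      have hadj_eq : s.zip (s.drop 1) = pvAdj s := rfl
      rw [hadj_eq] at hscan
      rw [pvB_loop]
      cases hf : pvB_findGo s mr r0 s.length 0 with
      | none =>
        rw [hf] at hscan
        have hnone : ∀ q ∈ pvAdj s, ¬ (pvRkB mr q = some r0) := by
          intro q hq hg
          have := List.find?_eq_none.mp hscan.symm q hq
          simp [hg] at this
        apply ih s rest ⟨(List.pairwise_cons.mp hsort).2, ?_, ?_, hne⟩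
          (by simp only [List.length_cons] at hfuel; omega)
        · intro q r hq hg
          rcases List.mem_cons.mp (hcompl q r hq hg) with h | h
          · exfalso
            have hr : r = r0 := congrArg Prod.fst h
            exact hnone q hq (hr ▸ hg)
          · exact h
        · intro e he; exact htruth e (List.mem_cons_of_mem _ he)
      | some q0 =>
        rw [hf] at hscan
        have hq0adj : q0 ∈ pvAdj s := List.mem_of_find?_eq_some hscan.symm
        have hq0rk : pvRkB mr q0 = some r0 := by
          have := List.find?_some hscan.symm
          simpa using this
        have hlen2 : 1 < s.length := pv_mem_adj_length hq0adj
        have hmin? := pv_min?_of_scan mr s r0 q0 Hmin hscan.symm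
        have hmc := pvB_mcGo_eq s q0 mr s.length [] [] 0 (by omega)
        simp only [List.drop_zero, List.getLast?_nil, List.nil_append] at hmc
        have hmc1 : (pvB_mcGo s q0 mr s.length [] [] 0).1 = (pvMC mr q0.1 q0.2 none s).1 := by rw [hmc]
        have hmc2 : (pvB_mcGo s q0 mr s.length [] [] 0).2 = (pvMC mr q0.1 q0.2 none s).2 := by rw [hmc]
        have hfst : (pvMC mr q0.1 q0.2 none s).1 = pvMergeSpec q0.1 q0.2 s :=
          pvMC_fst mr q0.1 q0.2 none s
        have ha : q0.1 ≠ "" := hne _ (pv_adj_fst_mem hq0adj)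
        have hb : q0.2 ≠ "" := hne _ (pv_adj_snd_mem hq0adj)
        have hnoocc : (q0.1, q0.2) ∉ pvAdj (pvMergeSpec q0.1 q0.2 s) := by
          have := pvMC_no_reoccur mr q0.1 q0.2 ha hb none s (by intro z hz; simp at hz)
          rw [pvOptCons_none, hfst] at this
          exact this
        show pvB_loop mr fuel (pvB_mcGo s q0 mr s.length [] [] 0).1
              ((pvB_mcGo s q0 mr s.length [] [] 0).2.foldl (fun ag item => pvB_insort ag item)
                (if q0 = p0 then rest else (r0, p0) :: rest)) = pvA_loop mr s.length s
        rw [hmc1, hmc2, hfst]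
        -- invariants for the recursive call
        have hsort1 : (if q0 = p0 then rest else (r0, p0) :: rest).Pairwise (fun e f => e.1 ≤ f.1) := by
          split_ifs
          · exact (List.pairwise_cons.mp hsort).2
          · exact hsort
        have hsub1 : ∀ e, e ∈ (if q0 = p0 then rest else (r0, p0) :: rest) → e ∈ (r0, p0) :: rest := by
          intro e he
          split_ifs at he
          · exact List.mem_cons_of_mem _ he
          · exact he
        have hW2 := pvMC_len mr q0.1 q0.2 none s
        rw [hfst] at hW2
        have hlt : (pvMergeSpec q0.1 q0.2 s).length < s.length :=
          pvMergeSpec_length_lt q0.1 q0.2 s hq0adj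
        have hinv' : pvInv mr (pvMergeSpec q0.1 q0.2 s)
            ((pvMC mr q0.1 q0.2 none s).2.foldl (fun ag item => pvB_insort ag item)
              (if q0 = p0 then rest else (r0, p0) :: rest)) := by
          refine ⟨pv_foldl_insort_sorted _ _ hsort1, ?_, ?_, ?_⟩
          · intro q r hq hg
            rw [pv_foldl_insort_mem]
            have hW4 := pvMC_complete mr q0.1 q0.2 none s q r
              (by rw [pvOptCons_none, hfst]; exact hq) hg
            rcases hW4 with h | h
            · rw [pvOptCons_none] at h
              rcases List.mem_cons.mp (hcompl q r h hg) with h2 | h2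
              · have hr : r = r0 := congrArg Prod.fst h2
                have hqp : q = p0 := congrArg Prod.snd h2
                by_cases hqq : q0 = p0
                · exfalso
                  have hqq0 : q = q0 := hqp.trans hqq.symm
                  rw [hqq0] at hq
                  exact hnoocc hq
                · left
                  rw [if_neg hqq, hr, hqp]
                  exact List.mem_cons_self
              · left
                split_ifs
                · exact h2
                · exact List.mem_cons_of_mem _ h2
            · right
              exact h
          · intro e he
            rw [pv_foldl_insort_mem] at he
            rcases he with he | he
            · exact htruth e (hsub1 e he)
            · exact pvMC_truthful mr q0.1 q0.2 none s e he
          · exact pvMergeSpec_ne_empty q0.1 q0.2 s hne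
        have hmeas : ((pvMC mr q0.1 q0.2 none s).2.foldl (fun ag item => pvB_insort ag item)
              (if q0 = p0 then rest else (r0, p0) :: rest)).length
            + 3 * (pvMergeSpec q0.1 q0.2 s).length ≤ fuel := by
          rw [pv_foldl_insort_length]
          have hag1 : (if q0 = p0 then rest else (r0, p0) :: rest).length ≤ rest.length + 1 := by
            split_ifs <;> simp
          simp only [List.length_cons] at hfuel
          omega
        rw [ih _ _ hinv' hmeas]
        -- the A side makes the same step
        obtain ⟨m, hm⟩ : ∃ m, s.length = m + 1 := ⟨s.length - 1, by omega⟩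
        rw [hm, pvA_loop_succ, if_pos hlen2, hmin?]
        show pvA_loop mr (pvMergeSpec q0.1 q0.2 s).length (pvMergeSpec q0.1 q0.2 s)
          = pvA_loop mr m (pvA_mergeGo s (r0, q0.1, q0.2).2 s.length [] 0)
        have : (r0, q0.1, q0.2).2 = (q0.1, q0.2) := rfl
        rw [this, pvA_mergeGo_spec s (q0.1, q0.2)]
        exact (pvA_loop_stable mr (m+1) (pvMergeSpec q0.1 q0.2 s)
          m (pvMergeSpec q0.1 q0.2 s).length (by omega) (by omega) (by omega)).symm

-- ---------- final formatting of the pieces ----------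

theorem pv_pieces_aux :
    ∀ (rest : List String) (k : Int), 0 < k →
      (PySem.List.enumerate rest k).map
        (fun iv =>
          let piece := if PySem.Str.endswith iv.2 "</w>" then PySem.Str.slice iv.2 none (some (-4)) else iv.2
          let piece := if iv.1 > 0 then "##" ++ piece else piece
          piece)
      = rest.map (fun s => "##" ++ pvB_strip s) := by
  intro rest
  induction rest with
  | nil => intro k _; rfl
  | cons s rest ih =>
    intro k hk
    rw [PySem.List.enumerate_cons, List.map_cons, List.map_cons, ih (k+1) (by omega)]
    simp only [pvB_strip]
    have : (k > 0) = True := by simp; omega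
    simp [this]

theorem pv_pieces_eq (l : List String) :
    (PySem.List.enumerate l).foldl
      (fun pieces iv =>
        let piece := if PySem.Str.endswith iv.2 "</w>" then PySem.Str.slice iv.2 none (some (-4)) else iv.2
        let piece := if iv.1 > 0 then "##" ++ piece else piece
        pieces ++ [piece]) []
    = match l with
      | [] => []
      | f :: rest => pvB_strip f :: rest.map (fun s => "##" ++ pvB_strip s) := by
  rw [PySem.List.foldl_append_singleton_eq_map
    (f := fun iv : Int × String =>
      let piece := if PySem.Str.endswith iv.2 "</w>" then PySem.Str.slice iv.2 none (some (-4)) else iv.2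
      let piece := if iv.1 > 0 then "##" ++ piece else piece
      piece)]
  cases l with
  | nil => rfl
  | cons f rest =>
    rw [PySem.List.enumerate_cons, List.map_cons, pv_pieces_aux rest (0+1) (by omega)]
    simp [pvB_strip]

-- ===== VERDICT (by name: the statement is the Claim_ definition above) =====
theorem apply_bpe_to_word_py_spec : Claim_equal_apply_bpe_to_word_py := by
  intro word mr _
  unfold Spec_apply_bpe_to_word_py
  by_cases hw : word = ""
  · subst hw
    simp [apply_bpe_to_word_py, apply_bpe_to_word_py_alt, pvA_wordToSymbols]
  · have hl : word.toList ≠ [] := by simpa using hw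
    have hgl : PySem.Str.pyGet? word (-1) = some (word.toList.getLast hl) := by
      rw [PySem.Str.pyGet?_eq]
      show PySem.List.pyGet? word.toList (-1) = _
      rw [PySem.List.pyGet?_neg_one, List.getLast?_eq_some_getLast hl]
    have hslice : (PySem.Str.slice word none (some (-1))).toList = word.toList.dropLast :=
      PySem.Str.slice_to_neg_one word
    have hmapne : word.toList.map (fun c => String.ofList [c]) ≠ [] := by simpa using hl
    have hsymA : pvA_wordToSymbols word =
        word.toList.dropLast.map (fun c => String.ofList [c])
          ++ [String.ofList [word.toList.getLast hl] ++ "</w>"] := by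
      rw [pvA_wordToSymbols, if_neg hw]
      rw [PySem.List.pyGetD_neg_one _ _ hmapne]
      rw [List.getLast_map hmapne]
      congr 1
      rw [List.dropLast_eq_take, List.dropLast_eq_take, ← List.map_take, List.length_map]
    set S : List String := word.toList.dropLast.map (fun c => String.ofList [c])
      ++ [String.ofList [word.toList.getLast hl] ++ "</w>"] with hS
    have hSne : S ≠ [] := by simp [hS]
    have hinv : ∀ x ∈ S, x ≠ "" := by
      intro x hx
      rcases List.mem_append.mp hx with h | h
      · obtain ⟨c, _, hc⟩ := List.mem_map.mp h
        subst hc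
        intro he
        have := congrArg String.toList he
        simp at this
      · rw [List.mem_singleton.mp h]
        apply pv_append_ne_empty
        intro he
        have := congrArg String.toList he
        simp at this
    simp only [apply_bpe_to_word_py, apply_bpe_to_word_py_alt, hsymA, hslice, hgl, if_neg hw]
    rw [if_neg hSne]
    rw [← hS, pv_pieces_eq]
    rw [pvB_loop_eq mr ((pvB_init S mr).length + 3 * S.length) S (pvB_init S mr)
      (pvInv_init mr S hinv) le_rfl]
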